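-- pv_equiv track=rewrite | github.com/thomast8/auto-scientist | src/auto_scientist/agents/prediction_query.py | build_status
-- ===== SOURCE A (Python) =====
-- from typing import Any
--
-- def build_status(predictions: list[dict[str, Any]]) -> str:
--     """Build a counts-only status summary (no tree, since tree is inline in prompt)."""
--     by_status: dict[str, int] = {}
--     for rec in predictions:
--         outcome = rec.get("outcome", "pending")
--         by_status[outcome] = by_status.get(outcome, 0) + 1
--
--     lines = [f"Total: {len(predictions)} predictions"]
--     for status in ["confirmed", "refuted", "inconclusive", "pending"]:
--         count = by_status.get(status, 0)
--         if count:
--             lines.append(f"  {status}: {count}")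
--     return "\n".join(lines)
-- ===== SOURCE B (Python) =====
-- def build_status(predictions: list[dict[str, object]]) -> str:
--     """Counts-only status summary via sort + run-length encoding (no frequency dict)."""
--     order = ["confirmed", "refuted", "inconclusive", "pending"]
--     keys = sorted(order.index(rec.get("outcome", "pending"))
--                   for rec in predictions
--                   if rec.get("outcome", "pending") in order)
--     runs = []  # run-length encoding of the sorted key list: [key, count]
--     for k in keys:
--         if runs and runs[-1][0] == k:
--             runs[-1][1] += 1
--         else:
--             runs.append([k, 1])
--     lines = [f"Total: {len(predictions)} predictions"]
--     for k, c in runs: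
--         lines.append(f"  {order[k]}: {c}")
--     return "\n".join(lines)
-- ===== Notes on version B (the rewrite author's own statement) =====
-- stated objective: alternative
-- what changed: Replaces A's frequency-dictionary build-then-lookup with sort-then-scan: B maps each record's outcome to its rank in the fixed status list, sorts the ranks, run-length-encodes the sorted list, and formats one line per run (nonzero suppression falls out because runs are nonempty).
import Mathlib
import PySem

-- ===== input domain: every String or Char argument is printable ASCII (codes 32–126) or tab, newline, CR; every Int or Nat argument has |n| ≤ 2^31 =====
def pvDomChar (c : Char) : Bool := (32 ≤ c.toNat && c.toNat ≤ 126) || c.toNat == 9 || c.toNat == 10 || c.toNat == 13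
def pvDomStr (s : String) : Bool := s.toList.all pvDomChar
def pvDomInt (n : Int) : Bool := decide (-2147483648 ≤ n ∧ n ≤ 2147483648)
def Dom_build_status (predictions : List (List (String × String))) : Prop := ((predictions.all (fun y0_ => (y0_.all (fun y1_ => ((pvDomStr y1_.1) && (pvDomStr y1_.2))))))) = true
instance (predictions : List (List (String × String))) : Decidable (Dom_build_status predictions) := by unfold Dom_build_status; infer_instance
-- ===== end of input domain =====

-- B replaces A's frequency dictionary with sort + run-length encoding of outcome ranks (alternative algorithm, same output).

-- ===== PORT A =====
-- A: build a counter dict over outcomes, then emit lines from dict lookups.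
def build_status (predictions : List (List (String × String))) : String :=
  let by_status : PySem.Dict String Int :=
    predictions.foldl
      (fun d rec =>
        let outcome := (PySem.Dict.mk rec).getD "outcome" "pending"
        d.insert outcome (d.getD outcome 0 + 1))
      PySem.Dict.empty
  let lines : List String :=
    ["confirmed", "refuted", "inconclusive", "pending"].foldl
      (fun ls status =>
        let count := by_status.getD status 0
        if count ≠ 0 then ls ++ ["  " ++ status ++ ": " ++ PySem.Int.toStr count] else ls)
      ["Total: " ++ PySem.Int.toStr (predictions.length : Int) ++ " predictions"]
  PySem.Str.join "\n" lines

-- ===== PORT B =====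
-- B: the fixed status list; `order.index` together with the `in order` guard is exactly filterMap index?.
def pvOrder : List String := ["confirmed", "refuted", "inconclusive", "pending"]

-- B's run-length loop body: extend the current (topmost) run or start a new one
-- (the Python loop appends to `runs` and mutates `runs[-1]`; here the stack is kept reversed, so
-- `runs[-1]` is the head, and the final stack is reversed once at the end).
def pvStep (acc : List (Nat × Nat)) (k : Nat) : List (Nat × Nat) :=
  match acc with
  | (y, c) :: t => if k == y then (y, c + 1) :: t else (k, 1) :: (y, c) :: t
  | [] => [(k, 1)]

-- B's line formatting: "  {order[k]}: {c}" (k is always a valid rank, so getD's default is never used).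
def pvFmt (kc : Nat × Nat) : String :=
  "  " ++ pvOrder.getD kc.1 "" ++ ": " ++ PySem.Int.toStr (kc.2 : Int)

def build_status_alt (predictions : List (List (String × String))) : String :=
  let keys : List Nat :=
    PySem.List.sorted
      (predictions.filterMap (fun rec =>
        PySem.List.index? pvOrder ((PySem.Dict.mk rec).getD "outcome" "pending")))
      (fun x => x) false
  let runs : List (Nat × Nat) := (keys.foldl pvStep []).reverse
  let lines : List String :=
    ("Total: " ++ PySem.Int.toStr (predictions.length : Int) ++ " predictions")
      :: runs.map pvFmt
  PySem.Str.join "\n" lines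

-- ===== PRECONDITION & SPEC =====
def Spec_build_status (predictions : List (List (String × String))) (out : String) : Prop := out = build_status_alt predictions
instance (predictions : List (List (String × String))) (out : String) : Decidable (Spec_build_status predictions out) := by unfold Spec_build_status; infer_instance

-- ===== CLAIM (what is proved, stated in full; the proofs are below) =====
def Claim_equal_build_status : Prop := ∀ (predictions : List (List (String × String))), Dom_build_status predictions → Spec_build_status predictions (build_status predictions)

-- ===== LEMMAS AND PROOFS =====

-- A's counter-dict loop: the count stored at key s is the number of records whose outcome is s.
theorem dict_count (l : List (List (String × String))) (s : String)
    (d : PySem.Dict String Int) :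
    (l.foldl
      (fun d rec =>
        let outcome := (PySem.Dict.mk rec).getD "outcome" "pending"
        d.insert outcome (d.getD outcome 0 + 1))
      d).getD s 0
    = d.getD s 0 + (l.countP (fun rec => (PySem.Dict.mk rec).getD "outcome" "pending" == s) : Int) := by
  induction l generalizing d with
  | nil => simp
  | cons rec xs ih =>
    rw [List.foldl_cons, ih, List.countP_cons, PySem.Dict.getD_insert]
    by_cases h : (PySem.Dict.mk rec).getD "outcome" "pending" = s
    · simp [h]; ring
    · simp [h, Ne.symm h]

-- order.index as an explicit 4-way case split on the outcome string
theorem idx_val (s : String) :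
    PySem.List.index? pvOrder s =
      if s = "confirmed" then some 0 else if s = "refuted" then some 1
      else if s = "inconclusive" then some 2 else if s = "pending" then some 3 else none := by
  split_ifs with h0 h1 h2 h3
  · subst h0; decide
  · subst h1; decide
  · subst h2; decide
  · subst h3; decide
  · rw [PySem.List.index?_eq_none_iff]
    simp [pvOrder]
    exact ⟨h0, h1, h2, h3⟩

-- counting k among the filterMap outputs = counting the records that map to some k
theorem count_filterMap {α β : Type} [DecidableEq β] (f : α → Option β) (b : β) (l : List α) :
    (l.filterMap f).count b = l.countP (fun x => f x == some b) := by
  induction l with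
  | nil => simp
  | cons x xs ih =>
    rw [List.filterMap_cons, List.countP_cons]
    cases hfx : f x with
    | none => simp [ih]
    | some v =>
      by_cases hv : v = b
      · subst hv; simp [ih]
      · simp [hv, ih]

-- extending the topmost run c0-many times
theorem run_same (k : Nat) (n : Nat) (c : Nat) (t : List (Nat × Nat)) :
    (List.replicate n k).foldl pvStep ((k, c) :: t) = (k, c + n) :: t := by
  induction n generalizing c with
  | zero => simp
  | succ m ih =>
    rw [List.replicate_succ, List.foldl_cons]
    show (List.replicate m k).foldl pvStep (pvStep ((k, c) :: t) k) = _
    simp only [pvStep, BEq.rfl, if_true]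
    rw [ih]
    have hcm : c + 1 + m = c + (m + 1) := by omega
    rw [hcm]

-- a block of n equal keys pushes one run (or nothing if n = 0) when the top run has a different key
theorem run_new (k : Nat) (n : Nat) (acc : List (Nat × Nat))
    (h : ∀ y c t, acc = (y, c) :: t → y ≠ k) :
    (List.replicate n k).foldl pvStep acc = if n = 0 then acc else (k, n) :: acc := by
  cases n with
  | zero => simp
  | succ m =>
    rw [List.replicate_succ, List.foldl_cons]
    have hstep : pvStep acc k = (k, 1) :: acc := by
      cases acc with
      | nil => rfl
      | cons p t =>
        obtain ⟨y, c⟩ := p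
        have hy : y ≠ k := h y c t rfl
        have hky : ¬ k = y := fun hh => hy hh.symm
        simp [pvStep, beq_iff_eq, hky]
    rw [hstep, run_same]
    simp
    omega

-- the sorted rank list is the concatenation of the four replicate blocks, counts taken from the raw list
theorem sorted_blocks (l : List Nat) (hmem : ∀ k ∈ l, k < 4) :
    PySem.List.sorted l (fun x => x) false =
      List.replicate (l.count 0) 0 ++ List.replicate (l.count 1) 1 ++
      List.replicate (l.count 2) 2 ++ List.replicate (l.count 3) 3 := by
  apply PySem.List.sorted_id_eq_of_perm_of_pairwise
  · rw [List.perm_iff_count]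
    intro a
    match a with
    | 0 => simp [List.count_append, List.count_replicate]
    | 1 => simp [List.count_append, List.count_replicate]
    | 2 => simp [List.count_append, List.count_replicate]
    | 3 => simp [List.count_append, List.count_replicate]
    | (m + 4) =>
      have h1 : (m + 4) ∉ l := fun hm => by have := hmem _ hm; omega
      simp [List.count_append, List.count_replicate, List.count_eq_zero.2 h1]
  · simp [List.pairwise_append, List.pairwise_replicate, List.mem_replicate]
    omega

-- proof-side abbreviation for the result of one block: push a run iff its count is nonzero
def pushRun (k n : Nat) (acc : List (Nat × Nat)) : List (Nat × Nat) :=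
  if n = 0 then acc else (k, n) :: acc

theorem head_pushRun (k n : Nat) (acc : List (Nat × Nat)) (j : Nat)
    (h : ∀ p ∈ acc.head?, p.1 < j) (hk : k < j) :
    ∀ p ∈ (pushRun k n acc).head?, p.1 < j := by
  unfold pushRun
  split_ifs
  · exact h
  · intro p hp
    simp at hp
    subst hp
    exact hk

theorem run_new' (k n : Nat) (acc : List (Nat × Nat))
    (h : ∀ p ∈ acc.head?, p.1 < k) :
    (List.replicate n k).foldl pvStep acc = pushRun k n acc := by
  rw [run_new k n acc, pushRun]
  intro y c t ht
  have := h (y, c) (by simp [ht])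
  omega

-- evaluating B's run-length fold on the four blocks, then formatting: one line per nonzero count
theorem stack_eval (c0 c1 c2 c3 : Nat) :
    (((List.replicate c0 0 ++ List.replicate c1 1 ++ List.replicate c2 2 ++
        List.replicate c3 3).foldl pvStep []).reverse).map pvFmt
    = (if c0 = 0 then [] else [pvFmt (0, c0)]) ++ (if c1 = 0 then [] else [pvFmt (1, c1)]) ++
      (if c2 = 0 then [] else [pvFmt (2, c2)]) ++ (if c3 = 0 then [] else [pvFmt (3, c3)]) := by
  have a0 : ∀ p ∈ (pushRun 0 c0 ([] : List (Nat × Nat))).head?, p.1 < 1 :=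
    head_pushRun 0 c0 [] 1 (by simp) (by omega)
  have a1 : ∀ p ∈ (pushRun 1 c1 (pushRun 0 c0 ([] : List (Nat × Nat)))).head?, p.1 < 2 :=
    head_pushRun 1 c1 _ 2 (fun p hp => Nat.lt_of_lt_of_le (a0 p hp) (by omega)) (by omega)
  have a2 : ∀ p ∈ (pushRun 2 c2 (pushRun 1 c1 (pushRun 0 c0 ([] : List (Nat × Nat))))).head?, p.1 < 3 :=
    head_pushRun 2 c2 _ 3 (fun p hp => Nat.lt_of_lt_of_le (a1 p hp) (by omega)) (by omega)
  rw [List.foldl_append, List.foldl_append, List.foldl_append,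
      run_new' 0 c0 [] (by simp),
      run_new' 1 c1 _ (fun p hp => a0 p hp),
      run_new' 2 c2 _ (fun p hp => a1 p hp),
      run_new' 3 c3 _ (fun p hp => a2 p hp)]
  by_cases h0 : c0 = 0 <;> by_cases h1 : c1 = 0 <;> by_cases h2 : c2 = 0 <;> by_cases h3 : c3 = 0 <;>
    simp [pushRun, h0, h1, h2, h3]

-- every rank produced by index? on the 4-element order list is < 4
theorem raw_lt (predictions : List (List (String × String))) :
    ∀ k ∈ predictions.filterMap (fun rec =>
        PySem.List.index? pvOrder ((PySem.Dict.mk rec).getD "outcome" "pending")), k < 4 := by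
  intro k hk
  obtain ⟨rec, _, hrec⟩ := List.mem_filterMap.1 hk
  obtain ⟨hlt, -, -⟩ := PySem.List.getElem_of_index?_eq_some hrec
  simpa [pvOrder] using hlt

-- rank-count = string-count, for each of the four statuses
theorem countP_bridge (predictions : List (List (String × String))) (i : Nat) (s : String)
    (hs : PySem.List.index? pvOrder s = some i ∧ ∀ t : String, PySem.List.index? pvOrder t = some i → t = s) :
    predictions.countP (fun rec =>
        PySem.List.index? pvOrder ((PySem.Dict.mk rec).getD "outcome" "pending") == some i)
      = predictions.countP (fun rec => (PySem.Dict.mk rec).getD "outcome" "pending" == s) := by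
  apply List.countP_congr
  intro rec _
  by_cases h : (PySem.Dict.mk rec).getD "outcome" "pending" = s
  · rw [h, PySem.List.index?_eq_idxOf?] at *
    rw [hs.1]
    simp
  · simp [h]
    intro hc
    exact h (hs.2 _ hc)

-- ===== VERDICT (by name: the statement is the Claim_ definition above) =====
theorem build_status_spec : Claim_equal_build_status := by
  intro predictions _
  unfold Spec_build_status build_status build_status_alt
  simp only
  congr 1
  rw [sorted_blocks _ (raw_lt predictions)]
  rw [count_filterMap, count_filterMap, count_filterMap, count_filterMap]
  rw [countP_bridge predictions 0 "confirmed"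
        ⟨by decide, by intro t ht; rw [idx_val] at ht; split_ifs at ht <;> simp_all⟩,
      countP_bridge predictions 1 "refuted"
        ⟨by decide, by intro t ht; rw [idx_val] at ht; split_ifs at ht <;> simp_all⟩,
      countP_bridge predictions 2 "inconclusive"
        ⟨by decide, by intro t ht; rw [idx_val] at ht; split_ifs at ht <;> simp_all⟩,
      countP_bridge predictions 3 "pending"
        ⟨by decide, by intro t ht; rw [idx_val] at ht; split_ifs at ht <;> simp_all⟩]
  rw [stack_eval]
  simp only [List.foldl_cons, List.foldl_nil, dict_count, PySem.Dict.getD_empty, zero_add]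
  by_cases h0 : predictions.countP (fun rec => (PySem.Dict.mk rec).getD "outcome" "pending" == "confirmed") = 0 <;>
  by_cases h1 : predictions.countP (fun rec => (PySem.Dict.mk rec).getD "outcome" "pending" == "refuted") = 0 <;>
  by_cases h2 : predictions.countP (fun rec => (PySem.Dict.mk rec).getD "outcome" "pending" == "inconclusive") = 0 <;>
  by_cases h3 : predictions.countP (fun rec => (PySem.Dict.mk rec).getD "outcome" "pending" == "pending") = 0 <;>
    simp [h0, h1, h2, h3, pvFmt, pvOrder]
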